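-- pv_equiv track=rewrite | github.com/alexrfholland/urban-futures | _futureSim_refactored/sim/generate_interim_state_data/engine_v2.py | split_window_into_pulses
-- ===== SOURCE A (Python) =====
-- MAX_RECRUIT_PULSE_YEARS = 30
--
-- def split_window_into_pulses(previous_year: int, absolute_year: int, max_pulse_years: int = MAX_RECRUIT_PULSE_YEARS):
--     if absolute_year <= previous_year:
--         return []
--
--     pulses = []
--     pulse_start = previous_year
--     while pulse_start < absolute_year:
--         pulse_end = min(pulse_start + max_pulse_years, absolute_year)
--         pulses.append((pulse_start, pulse_end))
--         pulse_start = pulse_end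
--     return pulses
-- ===== SOURCE B (Python) =====
-- MAX_RECRUIT_PULSE_YEARS = 30
--
-- def split_window_into_pulses(previous_year: int, absolute_year: int, max_pulse_years: int = MAX_RECRUIT_PULSE_YEARS):
--     span = absolute_year - previous_year
--     if span <= 0:
--         return []
--     n = -(-span // max_pulse_years)  # ceiling division: number of pulses
--     return [(previous_year + i * max_pulse_years,
--              min(previous_year + (i + 1) * max_pulse_years, absolute_year))
--             for i in range(n)]
-- ===== Notes on version B (the rewrite author's own statement) =====
-- stated objective: alternative
-- what changed: Replaces A's state-threading while loop by a closed form: compute the number of pulses with one ceiling division, then build each (start, end) pair directly from its index in a comprehension.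
import Mathlib
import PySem

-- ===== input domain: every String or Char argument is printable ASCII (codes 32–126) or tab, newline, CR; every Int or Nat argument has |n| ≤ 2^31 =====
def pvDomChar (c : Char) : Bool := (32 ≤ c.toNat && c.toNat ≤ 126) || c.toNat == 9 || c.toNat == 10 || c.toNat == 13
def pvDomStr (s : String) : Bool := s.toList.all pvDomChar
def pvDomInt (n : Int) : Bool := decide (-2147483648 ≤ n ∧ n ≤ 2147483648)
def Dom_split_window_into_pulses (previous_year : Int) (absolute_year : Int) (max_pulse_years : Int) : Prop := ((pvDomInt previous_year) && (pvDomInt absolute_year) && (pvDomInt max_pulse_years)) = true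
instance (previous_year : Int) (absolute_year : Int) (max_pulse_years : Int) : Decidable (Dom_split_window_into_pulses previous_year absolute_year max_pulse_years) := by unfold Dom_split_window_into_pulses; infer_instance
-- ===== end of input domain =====

-- B replaces A's state-threading while loop by a closed form: ceiling-division pulse count, then an indexed comprehension (objective: alternative).

-- ===== PORT A =====
-- A's while loop; the `pulse_start < pulse_end` guard only makes the recursion total
-- (under Pre_, max_pulse_years > 0 whenever the loop runs, so the guard always holds).
def pulsesLoopA (absolute_year max_pulse_years : Int) (pulse_start : Int)
    (pulses : List (Int × Int)) : List (Int × Int) :=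
  if h : pulse_start < absolute_year then
    let pulse_end := min (pulse_start + max_pulse_years) absolute_year
    if h2 : pulse_start < pulse_end then
      pulsesLoopA absolute_year max_pulse_years pulse_end (pulses ++ [(pulse_start, pulse_end)])
    else
      pulses ++ [(pulse_start, pulse_end)]
  else pulses
termination_by (absolute_year - pulse_start).toNat
decreasing_by simp only [pulse_end] at *; omega

def split_window_into_pulses (previous_year : Int) (absolute_year : Int) (max_pulse_years : Int) : List (Int × Int) :=
  if absolute_year ≤ previous_year then []
  else pulsesLoopA absolute_year max_pulse_years previous_year []

-- ===== PORT B =====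
def split_window_into_pulses_alt (previous_year : Int) (absolute_year : Int) (max_pulse_years : Int) : List (Int × Int) :=
  let span := absolute_year - previous_year
  if span ≤ 0 then []
  else
    let n := -(PySem.Int.floordiv (-span) max_pulse_years)
    (PySem.List.pyRange 0 n 1).map (fun i =>
      (previous_year + i * max_pulse_years,
       min (previous_year + (i + 1) * max_pulse_years) absolute_year))

-- ===== PRECONDITION & SPEC =====
-- Pre_ excludes only the inputs on which Python A never returns: a nonempty window with
-- max_pulse_years ≤ 0 makes A's while loop run forever (A diverges, so nothing is excluded that A returns on).
def Pre_split_window_into_pulses (previous_year : Int) (absolute_year : Int) (max_pulse_years : Int) : Prop :=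
  absolute_year ≤ previous_year ∨ 0 < max_pulse_years
instance (previous_year : Int) (absolute_year : Int) (max_pulse_years : Int) : Decidable (Pre_split_window_into_pulses previous_year absolute_year max_pulse_years) := by unfold Pre_split_window_into_pulses; infer_instance

def pvWitness_split_window_into_pulses : Int × Int × Int := (2000, 2065, 30)

def Spec_split_window_into_pulses (previous_year : Int) (absolute_year : Int) (max_pulse_years : Int) (out : List (Int × Int)) : Prop := out = split_window_into_pulses_alt previous_year absolute_year max_pulse_years
instance (previous_year : Int) (absolute_year : Int) (max_pulse_years : Int) (out : List (Int × Int)) : Decidable (Spec_split_window_into_pulses previous_year absolute_year max_pulse_years out) := by unfold Spec_split_window_into_pulses; infer_instance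

-- ===== CLAIM (what is proved, stated in full; the proofs are below) =====
def Claim_equal_split_window_into_pulses : Prop := ∀ (previous_year : Int) (absolute_year : Int) (max_pulse_years : Int), Dom_split_window_into_pulses previous_year absolute_year max_pulse_years → Pre_split_window_into_pulses previous_year absolute_year max_pulse_years → Spec_split_window_into_pulses previous_year absolute_year max_pulse_years (split_window_into_pulses previous_year absolute_year max_pulse_years)

-- ===== LEMMAS AND PROOFS =====

-- the ceiling-division pulse count of a window of length a - ps: base case (one clamped pulse left)
lemma ceilN_eq_one {a m ps : Int} (hm : 0 < m) (h1 : ps < a) (h2 : a ≤ ps + m) :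
    -(PySem.Int.floordiv (-(a - ps)) m) = 1 :=
  (PySem.Int.neg_floordiv_neg_eq_iff_of_pos hm).mpr ⟨by nlinarith, by nlinarith⟩

-- step case: one full pulse peels off one unit of the ceiling count
lemma ceilN_succ {a m ps : Int} (hm : 0 < m) (h2 : ps + m < a) :
    -(PySem.Int.floordiv (-(a - ps)) m) = -(PySem.Int.floordiv (-(a - (ps + m))) m) + 1 := by
  have hb := (PySem.Int.neg_floordiv_neg_eq_iff_of_pos hm).mp
    (rfl : -(PySem.Int.floordiv (-(a - (ps + m))) m) = _)
  exact (PySem.Int.neg_floordiv_neg_eq_iff_of_pos hm).mpr ⟨by nlinarith, by nlinarith⟩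

-- re-indexing the comprehension after the first pulse
lemma shift_map (a m ps q : Int) :
    (PySem.List.pyRange 1 (q + 1) 1).map
        (fun i => (ps + i * m, min (ps + (i + 1) * m) a)) =
    (PySem.List.pyRange 0 q 1).map
        (fun i => (ps + m + i * m, min (ps + m + (i + 1) * m) a)) := by
  rw [PySem.List.pyRange_one, PySem.List.pyRange_one]
  simp only [List.map_map]
  rw [show (q + 1 - 1).toNat = (q - 0).toNat by omega]
  apply List.map_congr_left
  intro k _
  simp only [Function.comp_apply]
  congr 1
  · ring
  · congr 1; ring

-- A's loop equals B's closed form whenever the step is positive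
lemma loop_eq_closed : ∀ (k : Nat) (a m ps : Int) (acc : List (Int × Int)),
    0 < m → (a - ps).toNat ≤ k → ps < a →
    pulsesLoopA a m ps acc =
      acc ++ (PySem.List.pyRange 0 (-(PySem.Int.floordiv (-(a - ps)) m)) 1).map
        (fun i => (ps + i * m, min (ps + (i + 1) * m) a)) := by
  intro k
  induction k with
  | zero => intro a m ps acc _ hk hlt; omega
  | succ k ih =>
    intro a m ps acc hm hk hlt
    rw [pulsesLoopA]
    simp only [hlt, dite_true]
    by_cases hcase : a ≤ ps + m
    · -- last pulse: pulse_end = a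
      have hpe : min (ps + m) a = a := by omega
      rw [ceilN_eq_one hm hlt hcase, hpe]
      simp only [hlt, dite_true]
      rw [pulsesLoopA]
      simp only [lt_irrefl, dite_false]
      rw [PySem.List.pyRange_one_cons (by norm_num : (0 : Int) < 1),
          PySem.List.pyRange_one_eq_nil (by norm_num : (1 : Int) ≤ 0 + 1)]
      simp only [List.map_cons, List.map_nil]
      rw [show ps + 0 * m = ps by ring, show ps + (0 + 1) * m = ps + m by ring, hpe]
    · -- pulse_end = ps + m, recurse
      push_neg at hcase
      have hpe : min (ps + m) a = ps + m := by omega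
      rw [hpe]
      simp only [show ps < ps + m by omega, dite_true]
      rw [ih a m (ps + m) (acc ++ [(ps, ps + m)]) hm (by omega) hcase]
      rw [ceilN_succ hm hcase]
      have hb := (PySem.Int.neg_floordiv_neg_eq_iff_of_pos hm).mp
        (rfl : -(PySem.Int.floordiv (-(a - (ps + m))) m) = _)
      set q := -(PySem.Int.floordiv (-(a - (ps + m))) m) with hqdef
      have hq0 : 0 ≤ q := by nlinarith
      rw [PySem.List.pyRange_one_cons (by omega : (0 : Int) < q + 1)]
      simp only [List.map_cons, List.append_assoc, List.cons_append, List.nil_append]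
      rw [show ps + 0 * m = ps by ring, show ps + (0 + 1) * m = ps + m by ring, hpe,
          show (0 : Int) + 1 = 1 by ring, shift_map a m ps q]

-- ===== VERDICT (by name: the statement is the Claim_ definition above) =====
theorem split_window_into_pulses_spec : Claim_equal_split_window_into_pulses := by
  intro p a m _ hpre
  unfold Spec_split_window_into_pulses split_window_into_pulses split_window_into_pulses_alt
  by_cases h : a ≤ p
  · simp [h, show a - p ≤ 0 by omega]
  · push_neg at h
    have hm : 0 < m := by rcases hpre with h' | h' <;> omega
    simp only [if_neg (by omega : ¬ a ≤ p), if_neg (by omega : ¬ a - p ≤ 0)]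
    rw [loop_eq_closed (a - p).toNat a m p [] hm (le_refl _) h]
    simp
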